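-- pv_equiv track=rewrite | github.com/BlueDragon747/eloipool_Blakecoin | bitcoin/script.py | countSigOps
-- ===== SOURCE A (Python) =====
-- def countSigOps(s):
-- 	# FIXME: don't count data as ops
-- 	c = 0
-- 	for ch in s:
-- 		if 0xac == ch & 0xfe:
-- 			c += 1
-- 		elif 0xae == ch & 0xfe:
-- 			c += 20
-- 	return c
-- ===== SOURCE B (Python) =====
-- def countSigOps(s):
-- 	t = [ch & 0xfe for ch in s]
-- 	return t.count(0xac) + 20 * t.count(0xae)
-- ===== Notes on version B (the rewrite author's own statement) =====
-- stated objective: idiomatic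
-- what changed: Replaces the byte-by-byte if/elif accumulator loop with one masking pass followed by two whole-list .count calls combined arithmetically.
import Mathlib
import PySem

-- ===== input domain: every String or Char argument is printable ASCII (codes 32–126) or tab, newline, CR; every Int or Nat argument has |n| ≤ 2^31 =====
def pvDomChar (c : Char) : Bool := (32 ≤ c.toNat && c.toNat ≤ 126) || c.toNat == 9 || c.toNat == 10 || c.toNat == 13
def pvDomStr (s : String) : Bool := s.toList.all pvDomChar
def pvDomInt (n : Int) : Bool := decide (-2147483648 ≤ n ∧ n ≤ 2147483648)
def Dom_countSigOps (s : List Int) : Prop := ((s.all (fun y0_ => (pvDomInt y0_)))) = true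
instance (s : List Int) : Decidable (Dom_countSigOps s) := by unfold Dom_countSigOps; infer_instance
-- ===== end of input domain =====

-- B does the same counting with one masking pass and two whole-list counts instead of an if/elif accumulator loop (idiomatic; same cost).

-- ===== PORT A =====
def countSigOps (s : List Int) : Int :=
  s.foldl (fun c ch =>
    if (0xac : Int) == PySem.Int.band ch 0xfe then c + 1
    else if (0xae : Int) == PySem.Int.band ch 0xfe then c + 20
    else c) 0

-- ===== PORT B =====
def countSigOps_alt (s : List Int) : Int :=
  let t := s.map (fun ch => PySem.Int.band ch 0xfe)
  (PySem.List.count t (0xac : Int) : Int) + 20 * (PySem.List.count t (0xae : Int) : Int)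

-- ===== PRECONDITION & SPEC =====
def Spec_countSigOps (s : List Int) (out : Int) : Prop := out = countSigOps_alt s
instance (s : List Int) (out : Int) : Decidable (Spec_countSigOps s out) := by unfold Spec_countSigOps; infer_instance

-- ===== CLAIM (what is proved, stated in full; the proofs are below) =====
def Claim_equal_countSigOps : Prop := ∀ (s : List Int), Dom_countSigOps s → Spec_countSigOps s (countSigOps s)

-- ===== LEMMAS AND PROOFS =====
theorem countSigOps_foldl (s : List Int) (c : Int) :
    s.foldl (fun c ch =>
      if (0xac : Int) == PySem.Int.band ch 0xfe then c + 1
      else if (0xae : Int) == PySem.Int.band ch 0xfe then c + 20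
      else c) c
    = c + ((s.map (fun ch => PySem.Int.band ch 0xfe)).count (0xac : Int) : Int)
        + 20 * ((s.map (fun ch => PySem.Int.band ch 0xfe)).count (0xae : Int) : Int) := by
  induction s generalizing c with
  | nil => simp
  | cons ch tl ih =>
    simp only [List.foldl_cons, List.map_cons, List.count_cons, ih]
    by_cases h1 : ((0xac : Int) == PySem.Int.band ch 0xfe) = true
    · have h1' : (PySem.Int.band ch 0xfe == (0xac : Int)) = true := by
        simpa [BEq.comm] using h1
      have h2 : (PySem.Int.band ch 0xfe == (0xae : Int)) = false := by
        simp at h1' ⊢; omega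
      simp [h1, h1', h2]; ring
    · by_cases h2 : ((0xae : Int) == PySem.Int.band ch 0xfe) = true
      · have h2' : (PySem.Int.band ch 0xfe == (0xae : Int)) = true := by
          simpa [BEq.comm] using h2
        have h1' : (PySem.Int.band ch 0xfe == (0xac : Int)) = false := by
          simp at h2' ⊢; omega
        simp [h1, h2, h1', h2']; ring
      · have h1' : (PySem.Int.band ch 0xfe == (0xac : Int)) = false := by
          simp at h1 ⊢; omega
        have h2' : (PySem.Int.band ch 0xfe == (0xae : Int)) = false := by
          simp at h2 ⊢; omega
        simp [h1, h2, h1', h2']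

-- ===== VERDICT (by name: the statement is the Claim_ definition above) =====
theorem countSigOps_spec : Claim_equal_countSigOps := by
  intro s _
  unfold Spec_countSigOps countSigOps countSigOps_alt
  simp only [PySem.List.count, countSigOps_foldl, List.count]
  ring
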